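-- pv_equiv track=rewrite | github.com/franciscomelov/python_practice | code_wars/who_is_the_killer.py | killer
-- ===== SOURCE A (Python) =====
-- def killer(suspect_info, dead):
--     deads = len(dead)
--     for key,value in suspect_info.items():
--         guilt = 0
--         for x in dead:
--             if x in value:
--                 guilt += 1
--             else:
--                 break
--         if guilt == deads:
--             return key
-- ===== SOURCE B (Python) =====
-- def killer(suspect_info, dead):
--     common = set(suspect_info)
--     for x in dead:
--         if not common:
--             break
--         common &= {s for s, val in suspect_info.items() if x in val}
--     for key in suspect_info:
--         if key in common:
--             return key
--     return None
-- ===== Notes on version B (the rewrite author's own statement) =====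
-- stated objective: alternative
-- what changed: B builds an inverted index: it intersects, per dead person, the set of suspects who know that person, then returns the first suspect key lying in the intersection, instead of A's per-suspect counting loop with an early break.
import Mathlib
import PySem

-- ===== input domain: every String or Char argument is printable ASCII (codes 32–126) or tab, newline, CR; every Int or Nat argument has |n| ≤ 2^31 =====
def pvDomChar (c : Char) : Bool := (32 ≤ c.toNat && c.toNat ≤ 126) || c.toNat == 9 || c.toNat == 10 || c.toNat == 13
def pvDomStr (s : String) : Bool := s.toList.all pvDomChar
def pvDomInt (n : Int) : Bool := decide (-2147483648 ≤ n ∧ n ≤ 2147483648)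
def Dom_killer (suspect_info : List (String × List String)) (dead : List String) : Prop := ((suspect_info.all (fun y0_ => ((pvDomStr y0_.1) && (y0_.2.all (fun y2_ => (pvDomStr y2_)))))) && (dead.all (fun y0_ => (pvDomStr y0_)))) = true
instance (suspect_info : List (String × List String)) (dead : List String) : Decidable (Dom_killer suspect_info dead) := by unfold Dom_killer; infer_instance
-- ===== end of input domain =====

-- B replaces A's per-suspect counting loop by an inverted-index set intersection; objective: alternative (same cost).

-- ===== PORT A =====
-- inner loop: guilt = number of dead known, with Python's early break
def killerGuilt (value : List String) : List String → Nat
  | [] => 0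
  | x :: rest => if value.contains x then killerGuilt value rest + 1 else 0

def killerLoop (dead : List String) (deads : Nat) : List (String × List String) → Option String
  | [] => none
  | (key, value) :: rest =>
      if killerGuilt value dead = deads then some key
      else killerLoop dead deads rest

def killer (suspect_info : List (String × List String)) (dead : List String) : Option String :=
  killerLoop dead dead.length suspect_info

-- ===== PORT B =====
-- {s for s, val in suspect_info.items() if x in val}
def knowers (suspect_info : List (String × List String)) (x : String) : PySem.Set String :=
  PySem.Set.ofList ((suspect_info.filter (fun p => p.2.contains x)).map Prod.fst)

-- for key in suspect_info: if key in common: return key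
def firstIn (common : PySem.Set String) : List (String × List String) → Option String
  | [] => none
  | (key, _) :: rest => if common.contains key then some key else firstIn common rest

-- for x in dead: if not common: break; common &= knowers(x)
def commonLoop (suspect_info : List (String × List String)) :
    List String → PySem.Set String → PySem.Set String
  | [], c => c
  | x :: rest, c =>
      if c.isEmpty then c
      else commonLoop suspect_info rest (PySem.Set.inter c (knowers suspect_info x))

def killer_alt (suspect_info : List (String × List String)) (dead : List String) : Option String :=
  let common := commonLoop suspect_info dead (PySem.Set.ofList (suspect_info.map Prod.fst))
  firstIn common suspect_info

-- ===== PRECONDITION & SPEC =====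
-- Pre_ excludes association lists with duplicate suspect keys: those cannot represent a
-- Python dict (dict construction silently drops earlier entries), so the list-level
-- behaviour of either port there is an artefact of the encoding, not of A or B.
def Pre_killer (suspect_info : List (String × List String)) (dead : List String) : Prop :=
  (suspect_info.map Prod.fst).Nodup

instance (suspect_info : List (String × List String)) (dead : List String) : Decidable (Pre_killer suspect_info dead) := by unfold Pre_killer; infer_instance

def pvWitness_killer : (List (String × List String)) × List String :=
  ([("a", ["x", "y"]), ("b", ["x"])], ["x", "y"])

def Spec_killer (suspect_info : List (String × List String)) (dead : List String) (out : Option String) : Prop := out = killer_alt suspect_info dead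
instance (suspect_info : List (String × List String)) (dead : List String) (out : Option String) : Decidable (Spec_killer suspect_info dead out) := by unfold Spec_killer; infer_instance

-- ===== CLAIM (what is proved, stated in full; the proofs are below) =====
def Claim_equal_killer : Prop := ∀ (suspect_info : List (String × List String)) (dead : List String), Dom_killer suspect_info dead → Pre_killer suspect_info dead → Spec_killer suspect_info dead (killer suspect_info dead)

-- ===== LEMMAS AND PROOFS =====

-- A's inner loop hits len(dead) exactly when the suspect knows every dead person
theorem killerGuilt_eq_length_iff (value dead : List String) :
    killerGuilt value dead = dead.length ↔ ∀ x ∈ dead, value.contains x := by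
  induction dead with
  | nil => simp [killerGuilt]
  | cons x rest ih =>
      simp only [killerGuilt, List.length_cons, List.mem_cons]
      by_cases h : value.contains x = true
      · rw [if_pos h,
          show (killerGuilt value rest + 1 = rest.length + 1) ↔
            (killerGuilt value rest = rest.length) from by omega, ih]
        constructor
        · intro hall y hy
          rcases hy with rfl | hy
          · exact h
          · exact hall y hy
        · intro hall y hy
          exact hall y (Or.inr hy)
      · rw [if_neg h]
        constructor
        · intro h0
          exact absurd h0 (by omega)
        · intro hall
          exact absurd (hall x (Or.inl rfl)) h

theorem mem_inter_iff (s : PySem.Set String) (t : List String) (x : String) :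
    x ∈ PySem.Set.inter s t ↔ x ∈ s ∧ x ∈ t := by
  simp [PySem.Set.inter]

theorem mem_knowers (suspect_info : List (String × List String)) (x key : String) :
    key ∈ knowers suspect_info x ↔ ∃ v, (key, v) ∈ suspect_info ∧ v.contains x := by
  simp only [knowers, PySem.Set.mem_ofList, List.mem_map, List.mem_filter]
  constructor
  · rintro ⟨⟨k, v⟩, ⟨hm, hc⟩, rfl⟩; exact ⟨v, hm, hc⟩
  · rintro ⟨v, hm, hc⟩; exact ⟨(key, v), ⟨hm, hc⟩, rfl⟩

-- membership in the intersection loop (the early break on an empty set changes nothing)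
theorem mem_common (suspect_info : List (String × List String)) (dead : List String)
    (c : PySem.Set String) (key : String) :
    key ∈ commonLoop suspect_info dead c ↔
      key ∈ c ∧ ∀ x ∈ dead, key ∈ knowers suspect_info x := by
  induction dead generalizing c with
  | nil => simp [commonLoop]
  | cons x rest ih =>
      simp only [commonLoop]
      by_cases he : c.isEmpty
      · rw [if_pos he]
        have hc : key ∉ c := by
          intro hk
          rw [List.isEmpty_iff.1 he] at hk
          cases hk
        simp [hc]
      · rw [if_neg he]
        simp only [ih, mem_inter_iff, List.mem_cons]
        constructor
        · rintro ⟨⟨hc, hk⟩, hall⟩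
          exact ⟨hc, fun y hy => hy.elim (fun e => e ▸ hk) (hall y)⟩
        · rintro ⟨hc, hall⟩
          exact ⟨⟨hc, hall x (Or.inl rfl)⟩, fun y hy => hall y (Or.inr hy)⟩

-- with distinct keys, an entry's value is determined by its key
theorem value_unique {suspect_info : List (String × List String)} {key : String} {v w : List String}
    (hnd : (suspect_info.map Prod.fst).Nodup)
    (hv : (key, v) ∈ suspect_info) (hw : (key, w) ∈ suspect_info) : v = w := by
  induction suspect_info with
  | nil => cases hv
  | cons p rest ih =>
      obtain ⟨k, u⟩ := p
      simp only [List.map_cons, List.nodup_cons] at hnd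
      rcases List.mem_cons.1 hv with hv1 | hv1 <;> rcases List.mem_cons.1 hw with hw1 | hw1
      · cases hv1; cases hw1; rfl
      · cases hv1
        exact absurd (List.mem_map.2 ⟨(key, w), hw1, rfl⟩) hnd.1
      · cases hw1
        exact absurd (List.mem_map.2 ⟨(key, v), hv1, rfl⟩) hnd.1
      · exact ih hnd.2 hv1 hw1

-- for a genuine entry, membership in common is exactly A's inner-loop condition
theorem mem_common_entry (suspect_info : List (String × List String)) (dead : List String)
    (key : String) (value : List String)
    (hnd : (suspect_info.map Prod.fst).Nodup) (hmem : (key, value) ∈ suspect_info) :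
    (key ∈ commonLoop suspect_info dead (PySem.Set.ofList (suspect_info.map Prod.fst))) ↔
      ∀ x ∈ dead, value.contains x := by
  rw [mem_common]
  constructor
  · rintro ⟨-, hall⟩ x hx
    rcases (mem_knowers _ _ _).1 (hall x hx) with ⟨v, hv, hc⟩
    rwa [value_unique hnd hv hmem] at hc
  · intro hall
    refine ⟨(PySem.Set.mem_ofList _ _).mpr (List.mem_map.mpr ⟨(key, value), hmem, rfl⟩), ?_⟩
    exact fun x hx => (mem_knowers _ _ _).2 ⟨value, hmem, hall x hx⟩

theorem loops_agree (suspect_info rest : List (String × List String)) (dead : List String)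
    (hnd : (suspect_info.map Prod.fst).Nodup)
    (hsub : ∀ p ∈ rest, p ∈ suspect_info) :
    killerLoop dead dead.length rest =
      firstIn (commonLoop suspect_info dead
        (PySem.Set.ofList (suspect_info.map Prod.fst))) rest := by
  induction rest with
  | nil => rfl
  | cons p tail ih =>
      obtain ⟨key, value⟩ := p
      have hmem : (key, value) ∈ suspect_info := hsub _ (List.mem_cons_self ..)
      have hcond : (PySem.Set.contains
          (commonLoop suspect_info dead
            (PySem.Set.ofList (suspect_info.map Prod.fst))) key = true) ↔
          killerGuilt value dead = dead.length := by
        rw [killerGuilt_eq_length_iff]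
        rw [← mem_common_entry suspect_info dead key value hnd hmem]
        simp [PySem.Set.contains]
      simp only [killerLoop, firstIn]
      by_cases h : killerGuilt value dead = dead.length
      · rw [if_pos h, if_pos (hcond.mpr h)]
      · rw [if_neg h, if_neg (fun hc => h (hcond.mp hc))]
        exact ih (fun p hp => hsub p (List.mem_cons_of_mem _ hp))

-- ===== VERDICT (by name: the statement is the Claim_ definition above) =====
theorem killer_spec : Claim_equal_killer := by
  intro suspect_info dead _ hpre
  unfold Spec_killer killer killer_alt
  exact loops_agree suspect_info suspect_info dead hpre (fun _ h => h)
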